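-- pv_equiv track=rewrite | github.com/Manasadevi-vs/AI-Lab | DFS_using_Stack.py | dfs_all_edges
-- ===== SOURCE A (Python) =====
-- def dfs_all_edges(graph):
--     visited = set()
--     res = []
--     for node in graph:
--         if node not in visited:
--             stack = [node]
--             while stack:
--                 curr = stack.pop()
--                 if curr in visited:
--                     continue
--                 visited.add(curr)
--                 res.append(curr)
--                 stack.extend(reversed(graph.get(curr, [])))
--     return res
-- ===== SOURCE B (Python) =====
-- def dfs_all_edges(graph):
--     # Iterative DFS with a stack of (node, next-neighbor-index) frames:
--     # marks nodes when first pushed, walks neighbors forward, so no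
--     # `reversed` copies and no stale duplicate entries on the stack.
--     visited = set()
--     res = []
--     for node in graph:
--         if node in visited:
--             continue
--         visited.add(node)
--         res.append(node)
--         stack = [(node, 0)]
--         while stack:
--             curr, i = stack[-1]
--             nbrs = graph.get(curr, [])
--             if i >= len(nbrs):
--                 stack.pop()
--                 continue
--             stack[-1] = (curr, i + 1)
--             nb = nbrs[i]
--             if nb not in visited:
--                 visited.add(nb)
--                 res.append(nb)
--                 stack.append((nb, 0))
--     return res
-- ===== Notes on version B (the rewrite author's own statement) =====
-- stated objective: alternative
-- what changed: A pops nodes from a flat stack, skipping already-visited entries and pushing reversed neighbour lists; B keeps a stack of (node, next-neighbour-index) frames, marks each node when first discovered and walks neighbour lists forward in place, so it never copies/reverses a neighbour list and never stores stale duplicate entries on the stack.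
import Mathlib
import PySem

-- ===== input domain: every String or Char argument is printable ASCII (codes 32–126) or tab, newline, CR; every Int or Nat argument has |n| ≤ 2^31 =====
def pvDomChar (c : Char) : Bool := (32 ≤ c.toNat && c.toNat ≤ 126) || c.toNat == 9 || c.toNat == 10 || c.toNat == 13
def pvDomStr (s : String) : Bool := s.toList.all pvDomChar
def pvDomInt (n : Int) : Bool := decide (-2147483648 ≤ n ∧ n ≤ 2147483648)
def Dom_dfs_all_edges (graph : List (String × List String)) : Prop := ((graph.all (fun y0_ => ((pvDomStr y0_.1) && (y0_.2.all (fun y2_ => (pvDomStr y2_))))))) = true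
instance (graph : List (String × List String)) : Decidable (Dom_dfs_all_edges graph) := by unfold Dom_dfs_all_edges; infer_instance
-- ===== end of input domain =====

-- B replaces A's flat stack (pop, skip-if-visited, push reversed neighbour lists) by a stack of
-- (node, next-neighbour-index) frames that marks nodes when first discovered: same return value,
-- no `reversed` copies and no stale duplicates on the stack (objective: alternative).

-- shared helper: graph.get(curr, []) on the dict
def pvNbrs (graph : List (String × List String)) (c : String) : List String :=
  PySem.Dict.getD (PySem.Dict.mk graph) c []

-- termination support (cited by the ports' decreasing_by): the finite universe of node names
-- and the count of those not yet visited
def pvU (graph : List (String × List String)) : List String :=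
  graph.map Prod.fst ++ graph.flatMap (fun p => p.2)

def pvCnt (graph : List (String × List String)) (v : PySem.Set String) : Nat :=
  ((pvU graph).filter (fun x => decide (x ∉ v))).length

theorem pvNbrs_subset {graph : List (String × List String)} {c x : String}
    (h : x ∈ pvNbrs graph c) : x ∈ pvU graph := by
  unfold pvNbrs at h
  rcases hg : PySem.Dict.get? (PySem.Dict.mk graph) c with _ | l
  · rw [PySem.Dict.getD_of_get?_eq_none _ _ hg] at h; cases h
  · rw [PySem.Dict.getD_of_get?_eq_some _ _ hg] at h
    have hm : (c, l) ∈ (PySem.Dict.mk graph).items := PySem.Dict.mem_items_of_get?_eq_some _ hg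
    exact List.mem_append_right _ (List.mem_flatMap.mpr ⟨(c, l), hm, h⟩)

theorem pvNbrs_of_not_mem_U {graph : List (String × List String)} {c : String}
    (h : c ∉ pvU graph) : pvNbrs graph c = [] := by
  have hk : c ∉ (PySem.Dict.mk graph).keys := by
    simp only [PySem.Dict.keys_mk]
    exact fun hc => h (List.mem_append_left _ hc)
  unfold pvNbrs
  exact PySem.Dict.getD_of_get?_eq_none _ _
    ((PySem.Dict.get?_eq_none_iff_not_mem_keys _ _).mpr hk)

theorem pvFilter_add (graph : List (String × List String)) (v : PySem.Set String) (c : String) :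
    ((pvU graph).filter (fun x => decide (x ∉ PySem.Set.add v c)))
      = ((pvU graph).filter (fun x => decide (x ∉ v))).filter (fun x => decide (x ≠ c)) := by
  rw [List.filter_filter]
  refine List.filter_congr (fun x _ => ?_)
  simp [PySem.Set.mem_add, and_comm, not_or]

theorem pvCnt_add_lt {graph : List (String × List String)} {v : PySem.Set String} {c : String}
    (hU : c ∈ pvU graph) (hv : c ∉ v) :
    pvCnt graph (PySem.Set.add v c) < pvCnt graph v := by
  unfold pvCnt
  rw [pvFilter_add]
  refine List.length_filter_lt_length_iff_exists.mpr ⟨c, ?_, by simp⟩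
  exact List.mem_filter.mpr ⟨hU, by simpa using hv⟩

theorem pvCnt_add_eq {graph : List (String × List String)} {v : PySem.Set String} {c : String}
    (hU : c ∉ pvU graph) : pvCnt graph (PySem.Set.add v c) = pvCnt graph v := by
  unfold pvCnt
  congr 1
  refine List.filter_congr (fun x hx => ?_)
  have : x ≠ c := fun h => hU (h ▸ hx)
  simp [PySem.Set.mem_add, this]

-- ===== PORT A =====
-- A's inner while-loop. Python pops from the END of `stack` and extends with reversed(nbrs);
-- we model the stack with its TOP as the list head, so pop = head and
-- extend-with-reversed = prepend the neighbour list in forward order.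
def dfsA_stack (graph : List (String × List String)) (v : PySem.Set String)
    (r : List String) (s : List String) : PySem.Set String × List String :=
  match s with
  | [] => (v, r)
  | c :: rest =>
    if c ∈ v then dfsA_stack graph v r rest
    else dfsA_stack graph (PySem.Set.add v c) (r ++ [c]) (pvNbrs graph c ++ rest)
termination_by (pvCnt graph v, s.length)
decreasing_by
  · exact Prod.Lex.right _ (by simp)
  · rename_i hmem
    by_cases hU : c ∈ pvU graph
    · exact Prod.Lex.left _ _ (pvCnt_add_lt hU hmem)
    · rw [pvCnt_add_eq hU, pvNbrs_of_not_mem_U hU]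
      exact Prod.Lex.right _ (by simp)

def dfs_all_edges (graph : List (String × List String)) : List String :=
  ((PySem.Dict.mk graph).keys.foldl
    (fun p node => if node ∈ p.1 then p else dfsA_stack graph p.1 p.2 [node])
    (PySem.Set.empty, [])).2

-- ===== PORT B =====
-- B's inner while-loop over a stack of (node, next-neighbour-index) frames, top = head.
def dfsB_frames (graph : List (String × List String)) (v : PySem.Set String)
    (r : List String) (fs : List (String × Nat)) : PySem.Set String × List String :=
  match fs with
  | [] => (v, r)
  | (c, i) :: rest =>
    if (pvNbrs graph c).length ≤ i then dfsB_frames graph v r rest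
    else if (pvNbrs graph c).getD i "" ∈ v then dfsB_frames graph v r ((c, i + 1) :: rest)
    else dfsB_frames graph (PySem.Set.add v ((pvNbrs graph c).getD i ""))
      (r ++ [(pvNbrs graph c).getD i ""]) (((pvNbrs graph c).getD i "", 0) :: (c, i + 1) :: rest)
termination_by (pvCnt graph v,
  fs.length + (fs.map (fun p => (pvNbrs graph p.1).length - p.2)).sum)
decreasing_by
  · rename_i _hle
    refine Prod.Lex.right _ ?_
    simp only [List.map_cons, List.sum_cons, List.length_cons]
    omega
  · rename_i hle _
    refine Prod.Lex.right _ ?_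
    simp only [List.map_cons, List.sum_cons, List.length_cons]
    omega
  · rename_i hle hmem
    have hlt : i < (pvNbrs graph c).length := by omega
    have hnb : (pvNbrs graph c).getD i "" ∈ pvNbrs graph c := by
      rw [List.getD_eq_getElem _ _ hlt]; exact List.getElem_mem hlt
    exact Prod.Lex.left _ _ (pvCnt_add_lt (pvNbrs_subset hnb) hmem)

def dfs_all_edges_alt (graph : List (String × List String)) : List String :=
  ((PySem.Dict.mk graph).keys.foldl
    (fun p node =>
      if node ∈ p.1 then p
      else dfsB_frames graph (PySem.Set.add p.1 node) (p.2 ++ [node]) [(node, 0)])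
    (PySem.Set.empty, [])).2

-- ===== PRECONDITION & SPEC =====
def Spec_dfs_all_edges (graph : List (String × List String)) (out : List String) : Prop := out = dfs_all_edges_alt graph
instance (graph : List (String × List String)) (out : List String) : Decidable (Spec_dfs_all_edges graph out) := by unfold Spec_dfs_all_edges; infer_instance

-- ===== CLAIM (what is proved, stated in full; the proofs are below) =====
def Claim_equal_dfs_all_edges : Prop := ∀ (graph : List (String × List String)), Dom_dfs_all_edges graph → Spec_dfs_all_edges graph (dfs_all_edges graph)

-- ===== LEMMAS AND PROOFS =====
-- one-step unfolding lemmas for the well-founded definitions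
theorem dfsA_stack_nil (graph : List (String × List String)) (v : PySem.Set String)
    (r : List String) : dfsA_stack graph v r [] = (v, r) := by
  rw [dfsA_stack.eq_def]

theorem dfsA_stack_cons (graph : List (String × List String)) (v : PySem.Set String)
    (r : List String) (c : String) (rest : List String) :
    dfsA_stack graph v r (c :: rest)
      = if c ∈ v then dfsA_stack graph v r rest
        else dfsA_stack graph (PySem.Set.add v c) (r ++ [c]) (pvNbrs graph c ++ rest) := by
  rw [dfsA_stack.eq_def]

-- B's frame stack denotes, frame by frame, the suffixes of neighbour lists that A's flat stack
-- still has to process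
theorem dfsB_frames_eq_stack (graph : List (String × List String)) (v : PySem.Set String)
    (r : List String) (fs : List (String × Nat)) :
    dfsB_frames graph v r fs
      = dfsA_stack graph v r (fs.flatMap (fun p => (pvNbrs graph p.1).drop p.2)) := by
  induction v, r, fs using dfsB_frames.induct graph with
  | case1 v r => rw [dfsB_frames]; simp [dfsA_stack_nil]
  | case2 v r c i rest hle ih =>
    rw [dfsB_frames]
    simp only [if_pos hle, List.flatMap_cons, List.drop_eq_nil_of_le hle, List.nil_append]
    exact ih
  | case3 v r c i rest hle hmem ih =>
    have hlt : i < (pvNbrs graph c).length := by omega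
    rw [dfsB_frames]
    simp only [if_neg hle, if_pos hmem, List.flatMap_cons, List.drop_eq_getElem_cons hlt]
    rw [ih, List.cons_append, dfsA_stack_cons]
    have hv : (pvNbrs graph c)[i] ∈ v := by
      rw [← List.getD_eq_getElem _ "" hlt]; exact hmem
    simp only [if_pos hv, List.flatMap_cons]
  | case4 v r c i rest hle hmem ih =>
    have hlt : i < (pvNbrs graph c).length := by omega
    rw [dfsB_frames]
    simp only [if_neg hle, if_neg hmem, List.flatMap_cons, List.drop_eq_getElem_cons hlt]
    rw [ih, List.cons_append, dfsA_stack_cons]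
    have hnb : (pvNbrs graph c).getD i "" = (pvNbrs graph c)[i] :=
      List.getD_eq_getElem _ _ hlt
    rw [← hnb]
    simp only [if_neg hmem, List.flatMap_cons, List.drop_zero]

-- ===== VERDICT (by name: the statement is the Claim_ definition above) =====
theorem dfs_all_edges_spec : Claim_equal_dfs_all_edges := by
  intro graph _
  unfold Spec_dfs_all_edges dfs_all_edges dfs_all_edges_alt
  have hfun : (fun (p : PySem.Set String × List String) node =>
        if node ∈ p.1 then p else dfsA_stack graph p.1 p.2 [node])
      = (fun (p : PySem.Set String × List String) node =>
        if node ∈ p.1 then p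
        else dfsB_frames graph (PySem.Set.add p.1 node) (p.2 ++ [node]) [(node, 0)]) := by
    funext p node
    by_cases h : node ∈ p.1
    · simp [h]
    · rw [if_neg h, if_neg h, dfsB_frames_eq_stack, dfsA_stack_cons, if_neg h]
      simp
  rw [hfun]
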